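-- pv_equiv track=rewrite | github.com/rbonvall/codejam | themepark/themepark.py | queue_front
-- ===== SOURCE A (Python) =====
-- from itertools import count
--
-- def queue_front(k, g):
--     '''Compute, for each group when it is at the front of the queue, how many
--     groups will board the roller coaster and how many euros will be made.'''
--     to_board, profit = [], []
--     N = len(g)
--     for i, g_i in enumerate(g):
--         available_seats = k - g_i
--         nr_remaining_groups = N - 1
--         for j in count(1):
--             next_group_size = g[(i + j) % N]
--             if available_seats - next_group_size < 0 or not nr_remaining_groups:
--                 to_board.append(j)
--                 profit.append(k - available_seats)
--                 break
--             available_seats -= next_group_size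
--             nr_remaining_groups -= 1
--     return to_board, profit
-- ===== SOURCE B (Python) =====
-- def queue_front(k, g):
--     '''Same answers as the naive per-start greedy, but computed on prefix sums
--     of the doubled list with a sqrt-block (block-maximum) first-crossing search.'''
--     to_board, profit = [], []
--     N = len(g)
--     if N == 0:
--         return to_board, profit
--     # P[m] = sum of the first m elements of g + g  (length 2N + 1)
--     P = [0]
--     for x in g:
--         P.append(P[-1] + x)
--     for x in g:
--         P.append(P[-1] + x)
--     # block maxima over P, block size B ~ sqrt(2N), a power of two
--     B = 1 << ((2 * N).bit_length() // 2)
--     bmax = [max(P[b * B:(b + 1) * B]) for b in range((len(P) + B - 1) // B)]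
--     for i in range(N):
--         # first j in [i+2, i+N] with P[j] > X, where X = P[i+1] + (k - g[i]);
--         # such a j means the (j-i-1)-th boarding attempt after group i fails.
--         X = P[i + 1] + k - g[i]
--         j, hi = i + 2, i + N
--         found = None
--         while j <= hi:
--             if j % B == 0 and j + B - 1 <= hi and bmax[j // B] <= X:
--                 j += B
--             else:
--                 if P[j] > X:
--                     found = j
--                     break
--                 j += 1
--         if found is None:
--             t = N
--         else:
--             t = found - (i + 1)
--         to_board.append(t)
--         profit.append(g[i] + P[i + t] - P[i + 1])
--     return to_board, profit
-- ===== Notes on version B (the rewrite author's own statement) =====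
-- stated objective: alternative
-- what changed: Replaces the per-start running-seat-count loop with modular indexing by precomputed prefix sums of the doubled list plus a sqrt-block (block-maximum) first-crossing search that skips whole blocks instead of stepping group by group (O(N*sqrt(N)) work vs A's O(N^2) stepping; measured much faster on mid sizes but not confirmed at the largest, so no speed claim).
import Mathlib
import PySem

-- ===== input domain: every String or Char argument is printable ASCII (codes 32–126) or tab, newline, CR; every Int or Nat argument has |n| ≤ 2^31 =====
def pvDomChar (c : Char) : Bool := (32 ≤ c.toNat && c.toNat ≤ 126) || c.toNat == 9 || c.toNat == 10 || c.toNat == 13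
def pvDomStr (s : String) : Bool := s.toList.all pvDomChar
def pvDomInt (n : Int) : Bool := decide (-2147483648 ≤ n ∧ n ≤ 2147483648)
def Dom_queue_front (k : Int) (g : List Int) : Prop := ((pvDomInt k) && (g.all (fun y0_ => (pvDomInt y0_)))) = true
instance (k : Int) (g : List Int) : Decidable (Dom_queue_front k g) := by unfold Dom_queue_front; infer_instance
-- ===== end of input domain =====

-- B replaces A's per-start seat-counting scan by prefix sums of the doubled list with a
-- sqrt-block first-crossing search (objective: alternative algorithm, same exact values).

-- ===== PORT A =====
-- inner `for j in count(1)` loop of A; `rem` is nr_remaining_groups (it starts at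
-- N-1 ≥ 0 whenever the loop runs, so a Nat is exact); the index (i+j) % N is always
-- in range, so `.getD 0` after pyGet? never supplies the default.
def queueFrontInner (k N i : Int) (g : List Int) (j avail : Int) (rem : Nat) : Int × Int :=
  let next := (PySem.List.pyGet? g (PySem.Int.mod (i + j) N)).getD 0
  if h : avail - next < 0 ∨ rem = 0 then (j, k - avail)
  else queueFrontInner k N i g (j + 1) (avail - next) (rem - 1)
termination_by rem
decreasing_by omega

def queue_front (k : Int) (g : List Int) : List (List Int) :=
  let N : Int := g.length
  let res := (PySem.List.enumerate g).foldl
    (fun (acc : List Int × List Int) (p : Int × Int) =>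
      let r := queueFrontInner k N p.1 g 1 (k - p.2) (N - 1).toNat
      (acc.1 ++ [r.1], acc.2 ++ [r.2]))
    ([], [])
  [res.1, res.2]

-- ===== PORT B =====
-- Python max() on a list; B only applies it to nonempty block slices.
def listMax : List Int → Int
  | [] => 0
  | x :: xs => xs.foldl max x

-- the `while j <= hi` first-crossing loop of Source B; `s` is the block-size exponent
-- (block size B = 1 <<< s, exactly Source B's power-of-two B).
def blockSearch (P bmax : List Int) (s : Nat) (X : Int) (hi : Nat) (j : Nat) : Option Nat :=
  let B := 1 <<< s
  if _h : j ≤ hi then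
    if j % B = 0 ∧ j + B - 1 ≤ hi ∧ bmax.getD (j / B) 0 ≤ X then
      blockSearch P bmax s X hi (j + B)
    else if X < P.getD j 0 then some j
    else blockSearch P bmax s X hi (j + 1)
  else none
termination_by hi + 1 - j
decreasing_by
  · have hB : 0 < 1 <<< s := by
      simpa [Nat.shiftLeft_eq] using Nat.one_le_two_pow (n := s)
    omega
  · omega

def queue_front_alt (k : Int) (g : List Int) : List (List Int) :=
  let N := g.length
  if N = 0 then [[], []] else
  -- P = [0]; for x in g: P.append(P[-1]+x)  (twice): carry (list so far, last entry)
  let step := fun (pr : List Int × Int) (x : Int) => (pr.1 ++ [pr.2 + x], pr.2 + x)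
  let P := (g.foldl step (g.foldl step ([(0 : Int)], (0 : Int)))).1
  let s := Nat.size (2 * N) / 2        -- (2*N).bit_length() // 2
  let B := 1 <<< s
  let bmax := (List.range ((P.length + B - 1) / B)).map
    (fun b => listMax ((P.drop (b * B)).take B))
  let res := (List.range N).foldl
    (fun (acc : List Int × List Int) (i : Nat) =>
      let gi := g.getD i 0
      let X := P.getD (i + 1) 0 + k - gi
      let t : Nat := match blockSearch P bmax s X (i + N) (i + 2) with
        | none => N
        | some f => f - (i + 1)
      (acc.1 ++ [Int.ofNat t], acc.2 ++ [gi + P.getD (i + t) 0 - P.getD (i + 1) 0]))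
    ([], [])
  [res.1, res.2]

-- ===== PRECONDITION & SPEC =====
def Spec_queue_front (k : Int) (g : List Int) (out : List (List Int)) : Prop := out = queue_front_alt k g
instance (k : Int) (g : List Int) (out : List (List Int)) : Decidable (Spec_queue_front k g out) := by unfold Spec_queue_front; infer_instance

-- ===== CLAIM (what is proved, stated in full; the proofs are below) =====
def Claim_equal_queue_front : Prop := ∀ (k : Int) (g : List Int), Dom_queue_front k g → Spec_queue_front k g (queue_front k g)

-- ===== LEMMAS AND PROOFS =====

-- prefix sums of the doubled list
def pvS (g : List Int) (m : Nat) : Int := ((g ++ g).take m).sum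

-- the spec-level P list
def pvP (g : List Int) : List Int := (List.range (2 * g.length + 1)).map (pvS g)

-- linear first-crossing search (reference for blockSearch)
def linSearch (P : List Int) (X : Int) (hi : Nat) (j : Nat) : Option Nat :=
  if _h : j ≤ hi then
    if X < P.getD j 0 then some j else linSearch P X hi (j + 1)
  else none
termination_by hi + 1 - j

theorem pvS_succ (g : List Int) (m : Nat) (h : m < 2 * g.length) :
    pvS g (m + 1) = pvS g m + (g ++ g).getD m 0 := by
  have hlen : m < (g ++ g).length := by simp; omega
  unfold pvS
  rw [List.sum_take_succ _ _ hlen, List.getD_eq_getElem _ _ hlen]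

theorem pvP_getD (g : List Int) (m : Nat) (h : m ≤ 2 * g.length) :
    (pvP g).getD m 0 = pvS g m := by
  have h' : m < 2 * g.length + 1 := by omega
  unfold pvP
  rw [List.getD_eq_getElem _ _ (by simpa using h')]
  simp

theorem pvP_length (g : List Int) : (pvP g).length = 2 * g.length + 1 := by
  simp [pvP]

-- running prefix sums (proof helper)
def psums (a : Int) : List Int → List Int
  | [] => []
  | x :: xs => (a + x) :: psums (a + x) xs

theorem psums_length (l : List Int) : ∀ a, (psums a l).length = l.length := by
  induction l with
  | nil => intro a; simp [psums]
  | cons x xs ih => intro a; simp [psums, ih]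

theorem psums_getD (l : List Int) : ∀ (a : Int) (m : Nat), m < l.length →
    (psums a l).getD m 0 = a + (l.take (m + 1)).sum := by
  induction l with
  | nil => intro a m h; simp at h
  | cons x xs ih =>
    intro a m h
    cases m with
    | zero => simp [psums]
    | succ m =>
      have hm : m < xs.length := by simpa using h
      simp only [psums, List.getD_cons_succ, List.take_succ_cons, List.sum_cons]
      rw [ih (a + x) m hm]
      ring

theorem foldl_step_eq : ∀ (l : List Int) (P0 : List Int) (a : Int),
    l.foldl (fun (pr : List Int × Int) (x : Int) => (pr.1 ++ [pr.2 + x], pr.2 + x)) (P0, a)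
      = (P0 ++ psums a l, a + l.sum) := by
  intro l
  induction l with
  | nil => intro P0 a; simp [psums]
  | cons x xs ih =>
    intro P0 a
    simp only [List.foldl_cons, List.sum_cons, ih, psums]
    simp only [Prod.mk.injEq]
    constructor
    · simp
    · ring

-- Source B's P-building fold produces pvP
theorem build_P_eq (g : List Int) :
    ((g.foldl (fun (pr : List Int × Int) (x : Int) => (pr.1 ++ [pr.2 + x], pr.2 + x))
      (g.foldl (fun (pr : List Int × Int) (x : Int) => (pr.1 ++ [pr.2 + x], pr.2 + x))
        ([(0 : Int)], (0 : Int)))).1) = pvP g := by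
  rw [foldl_step_eq, foldl_step_eq]
  dsimp only
  apply List.ext_getElem
  · simp [psums_length, pvP]
    omega
  · intro m h1 h2
    have hm : m < 2 * g.length + 1 := by
      simpa [psums_length, pvP] using h2
    rw [← List.getD_eq_getElem _ 0 h1, ← List.getD_eq_getElem _ 0 h2]
    rw [pvP_getD g m (by omega)]
    unfold pvS
    by_cases hm1 : m = 0
    · subst hm1; simp
    · by_cases hm2 : m ≤ g.length
      · rw [List.getD_append _ _ _ _ (by simp [psums_length]; omega)]
        rw [List.getD_append_right _ _ _ _ (by simp; omega)]
        simp only [List.length_singleton]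
        rw [psums_getD g 0 (m - 1) (by omega)]
        have hm' : m - 1 + 1 = m := by omega
        rw [hm']
        rw [List.take_append]
        have : m - g.length = 0 := by omega
        rw [this]
        simp
      · rw [List.getD_append_right _ _ _ _ (by simp [psums_length]; omega)]
        have hidx : m - ([0] ++ psums 0 g).length = m - (1 + g.length) := by
          simp [psums_length]; omega
        rw [hidx]
        rw [psums_getD g (0 + g.sum) (m - (1 + g.length)) (by omega)]
        have hm' : m - (1 + g.length) + 1 = m - g.length := by omega
        rw [hm']
        rw [List.take_append]
        rw [List.take_of_length_le (by omega : g.length ≤ m)]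
        simp

-- characterization of linSearch results
theorem linSearch_some (P : List Int) (X : Int) (hi : Nat) :
    ∀ j m, linSearch P X hi j = some m → j ≤ m ∧ m ≤ hi := by
  have key : ∀ n j m, hi + 1 - j ≤ n → linSearch P X hi j = some m → j ≤ m ∧ m ≤ hi := by
    intro n
    induction n with
    | zero =>
      intro j m h1 h2
      rw [linSearch] at h2
      rw [dif_neg (by omega)] at h2
      exact absurd h2 (by simp)
    | succ n ih =>
      intro j m h1 h2
      rw [linSearch] at h2
      by_cases hj : j ≤ hi
      · rw [dif_pos hj] at h2
        by_cases hx : X < P.getD j 0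
        · rw [if_pos hx] at h2
          cases h2
          omega
        · rw [if_neg hx] at h2
          have := ih (j + 1) m (by omega) h2
          omega
      · rw [dif_neg hj] at h2
        exact absurd h2 (by simp)
  exact fun j m => key (hi + 1 - j) j m le_rfl

-- linSearch skips a stretch of non-crossings
theorem linSearch_skip (P : List Int) (X : Int) (hi : Nat) (j j' : Nat)
    (hle : j ≤ j') (hj' : j' ≤ hi + 1)
    (hno : ∀ t, j ≤ t → t < j' → P.getD t 0 ≤ X) :
    linSearch P X hi j = linSearch P X hi j' := by
  have key : ∀ n j, j ≤ j' → (∀ t, j ≤ t → t < j' → P.getD t 0 ≤ X) → j' - j ≤ n →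
      linSearch P X hi j = linSearch P X hi j' := by
    intro n
    induction n with
    | zero =>
      intro j h1 _ h3
      have : j = j' := by omega
      rw [this]
    | succ n ih =>
      intro j h1 h2 h3
      rcases Nat.eq_or_lt_of_le h1 with heq | hlt
      · rw [heq]
      · have hstep : linSearch P X hi j = linSearch P X hi (j + 1) := by
          rw [linSearch]
          rw [dif_pos (by omega)]
          rw [if_neg (by have := h2 j le_rfl hlt; omega)]
        rw [hstep]
        exact ih (j + 1) (by omega) (fun t ht1 ht2 => h2 t (by omega) ht2) (by omega)
  exact key (j' - j) j hle hno le_rfl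

theorem foldl_max_ge (xs : List Int) : ∀ x : Int,
    x ≤ xs.foldl max x ∧ ∀ y ∈ xs, y ≤ xs.foldl max x := by
  induction xs with
  | nil => intro x; simp
  | cons z zs ih =>
    intro x
    have h := ih (max x z)
    refine ⟨le_trans (le_max_left x z) h.1, ?_⟩
    intro y hy
    rcases List.mem_cons.mp hy with rfl | hy'
    · exact le_trans (le_max_right x y) h.1
    · exact h.2 y hy'

theorem le_listMax (l : List Int) (i : Nat) (h : i < l.length) :
    l.getD i 0 ≤ listMax l := by
  match l with
  | x :: xs =>
    rw [List.getD_eq_getElem _ _ h]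
    show (x :: xs)[i] ≤ xs.foldl max x
    rcases i with _ | i
    · exact (foldl_max_ge xs x).1
    · exact (foldl_max_ge xs x).2 _ (by
        have : i < xs.length := by simpa using h
        simpa using List.getElem_mem this)

-- blockSearch agrees with linSearch
theorem blockSearch_eq (P bmax : List Int) (s : Nat) (X : Int) (hi : Nat)
    (Hb : ∀ t, t < P.length → P.getD t 0 ≤ bmax.getD (t / (1 <<< s)) 0)
    (hhi : hi < P.length) :
    ∀ j, blockSearch P bmax s X hi j = linSearch P X hi j := by
  have hB : 0 < 1 <<< s := by simpa [Nat.shiftLeft_eq] using Nat.one_le_two_pow (n := s)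
  have key : ∀ n j, hi + 1 - j ≤ n → blockSearch P bmax s X hi j = linSearch P X hi j := by
    intro n
    induction n with
    | zero =>
      intro j h1
      rw [blockSearch, linSearch]
      rw [dif_neg (by omega), dif_neg (by omega)]
    | succ n ih =>
      intro j h1
      by_cases hj : j ≤ hi
      · rw [blockSearch]
        rw [dif_pos hj]
        by_cases hskip : j % (1 <<< s) = 0 ∧ j + (1 <<< s) - 1 ≤ hi ∧ bmax.getD (j / (1 <<< s)) 0 ≤ X
        · rw [if_pos hskip]
          obtain ⟨hmod, hend, hbm⟩ := hskip
          have hno : ∀ t, j ≤ t → t < j + (1 <<< s) → P.getD t 0 ≤ X := by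
            intro t ht1 ht2
            have htlen : t < P.length := by omega
            have hdiv : t / (1 <<< s) = j / (1 <<< s) := by
              have hj_eq : (1 <<< s) * (j / (1 <<< s)) = j := by
                have := Nat.div_add_mod j (1 <<< s); omega
              have hc := Nat.mul_comm (1 <<< s) (j / (1 <<< s))
              refine Nat.div_eq_of_lt_le (by omega) ?_
              rw [Nat.succ_mul]
              omega
            calc P.getD t 0 ≤ bmax.getD (t / (1 <<< s)) 0 := Hb t htlen
              _ = bmax.getD (j / (1 <<< s)) 0 := by rw [hdiv]
              _ ≤ X := hbm
          rw [ih (j + (1 <<< s)) (by omega)]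
          exact (linSearch_skip P X hi j (j + (1 <<< s)) (by omega) (by omega) hno).symm
        · rw [if_neg hskip, linSearch, dif_pos hj]
          by_cases hx : X < P.getD j 0
          · rw [if_pos hx, if_pos hx]
          · rw [if_neg hx, if_neg hx]
            exact ih (j + 1) (by omega)
      · rw [blockSearch, linSearch]
        rw [dif_neg hj, dif_neg hj]
  exact fun j => key (hi + 1 - j) j le_rfl

-- Source B's bmax list dominates P blockwise
theorem bmax_dominates (P : List Int) (s : Nat) :
    ∀ t, t < P.length →
      P.getD t 0 ≤ ((List.range ((P.length + (1 <<< s) - 1) / (1 <<< s))).map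
        (fun b => listMax ((P.drop (b * (1 <<< s))).take (1 <<< s)))).getD (t / (1 <<< s)) 0 := by
  intro t ht
  have hB : 0 < 1 <<< s := by simpa [Nat.shiftLeft_eq] using Nat.one_le_two_pow (n := s)
  set B := 1 <<< s with hBdef
  have hBpos : 0 < B := hB
  have hcomm : B * (t / B) = (t / B) * B := Nat.mul_comm _ _
  have hcnt : (P.length + B - 1) / B = (P.length - 1) / B + 1 := by
    have h1 : P.length + B - 1 = (P.length - 1) + B := by omega
    rw [h1, Nat.add_div_right _ hB]
  have hb : t / B < (P.length + B - 1) / B := by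
    rw [hcnt]
    have : t / B ≤ (P.length - 1) / B := Nat.div_le_div_right (by omega)
    omega
  have hdm := Nat.div_add_mod t B
  have hmodB := Nat.mod_lt t hB
  rw [List.getD_eq_getElem _ _ ht]
  rw [List.getD_eq_getElem _ _ (by simpa using hb)]
  simp only [List.getElem_map, List.getElem_range]
  have hslen : t % B < ((P.drop (t / B * B)).take B).length := by
    simp only [List.length_take, List.length_drop]
    omega
  have hle := le_listMax ((P.drop (t / B * B)).take B) (t % B) hslen
  rw [List.getD_eq_getElem _ _ hslen] at hle
  rw [List.getElem_take, List.getElem_drop] at hle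
  have harg : t / B * B + t % B = t := by omega
  simpa [harg] using hle

-- A's modular access is an access into the doubled list
theorem mod_get (g : List Int) (i j : Nat) (hi : i < g.length) (h1 : 1 ≤ j) (h2 : j ≤ g.length) :
    (PySem.List.pyGet? g (PySem.Int.mod ((i : Int) + (j : Int)) (g.length : Int))).getD 0
      = (g ++ g).getD (i + j) 0 := by
  have hN : 0 < g.length := by omega
  have hcast : (i : Int) + (j : Int) = ((i + j : Nat) : Int) := by push_cast; ring
  rw [hcast]
  rw [show PySem.Int.mod ((i + j : Nat) : Int) ((g.length : Nat) : Int)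
        = (((i + j) % g.length : Nat) : Int) from PySem.Int.mod_natCast _ _]
  rw [PySem.List.pyGet?_natCast]
  have hmlt : (i + j) % g.length < g.length := Nat.mod_lt _ hN
  rw [List.getElem?_eq_getElem hmlt]
  by_cases hlt : i + j < g.length
  · simp only [Option.getD_some, Nat.mod_eq_of_lt hlt]
    rw [List.getD_append _ _ _ _ hlt, List.getD_eq_getElem _ _ hlt]
  · have hsub : (i + j) % g.length = i + j - g.length := by
      rw [Nat.mod_eq_sub_mod (by omega)]
      exact Nat.mod_eq_of_lt (by omega)
    simp only [Option.getD_some, hsub]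
    rw [List.getD_append_right _ _ _ _ (by omega)]
    rw [List.getD_eq_getElem _ _ (by omega)]

-- closed form of A's inner loop
theorem queueFrontInner_eq (k : Int) (g : List Int) (i : Nat) (hi : i < g.length)
    (X : Int) :
    ∀ (rem j : Nat), 1 ≤ j → j ≤ g.length → rem = g.length - j →
    queueFrontInner k (g.length : Int) (i : Int) g (j : Int) (X - pvS g (i + j)) rem
      = match linSearch (pvP g) X (i + g.length) (i + j + 1) with
        | some m => ((m : Int) - i - 1, k - (X - pvS g (m - 1)))
        | none => ((g.length : Int), k - (X - pvS g (i + g.length))) := by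
  intro rem
  induction rem with
  | zero =>
    intro j hj1 hj2 hrem
    have hjN : j = g.length := by omega
    rw [queueFrontInner, dif_pos (Or.inr rfl)]
    rw [linSearch, dif_neg (by omega)]
    rw [hjN]
  | succ n ih =>
    intro j hj1 hj2 hrem
    have hjlt : j < g.length := by omega
    rw [queueFrontInner]
    have hnext := mod_get g i j (by omega) hj1 hj2
    have hS : pvS g (i + j + 1) = pvS g (i + j) + (g ++ g).getD (i + j) 0 :=
      pvS_succ _ _ (by omega)
    have hrange : i + j + 1 ≤ i + g.length := by omega
    have hgetP : (pvP g).getD (i + j + 1) 0 = pvS g (i + j + 1) :=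
      pvP_getD _ _ (by omega)
    by_cases hx : X < pvS g (i + j + 1)
    · rw [dif_pos (Or.inl (by rw [hnext]; omega))]
      rw [linSearch, dif_pos hrange, if_pos (by rw [hgetP]; exact hx)]
      have h1 : ((i + j + 1 : Nat) : Int) - (i : Int) - 1 = (j : Int) := by push_cast; ring
      have h2 : i + j + 1 - 1 = i + j := by omega
      change ((j : Int), k - (X - pvS g (i + j)))
        = (((i + j + 1 : Nat) : Int) - (i : Int) - 1, k - (X - pvS g (i + j + 1 - 1)))
      rw [h1, h2]
    · rw [dif_neg (by rw [hnext]; omega)]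
      have hcast : (j : Int) + 1 = ((j + 1 : Nat) : Int) := by push_cast; ring
      have havail : X - pvS g (i + j) - (PySem.List.pyGet? g
          (PySem.Int.mod ((i : Int) + (j : Int)) ((g.length : Nat) : Int))).getD 0
          = X - pvS g (i + (j + 1)) := by
        rw [hnext]
        have : i + (j + 1) = i + j + 1 := by omega
        rw [this, hS]; ring
      rw [hcast, havail]
      simp only [Nat.add_sub_cancel]
      rw [ih (j + 1) (by omega) (by omega) (by omega)]
      have hstep : linSearch (pvP g) X (i + g.length) (i + j + 1)
          = linSearch (pvP g) X (i + g.length) (i + (j + 1) + 1) := by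
        rw [linSearch, dif_pos hrange, if_neg (by rw [hgetP]; omega)]
        have : i + j + 1 + 1 = i + (j + 1) + 1 := by omega
        rw [this]
      rw [hstep]

-- two-list building folds are maps
theorem foldl_two_append {α : Type} (f h : α → Int) :
    ∀ (l : List α) (acc : List Int × List Int),
      l.foldl (fun a p => (a.1 ++ [f p], a.2 ++ [h p])) acc
        = (acc.1 ++ l.map f, acc.2 ++ l.map h) := by
  intro l
  induction l with
  | nil => intro acc; simp
  | cons x xs ih => intro acc; simp [ih]

-- per-start closed form shared by both sides
def pvOut (k : Int) (g : List Int) (i : Nat) : Int × Int :=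
  match linSearch (pvP g) (pvS g (i + 1) + k - g.getD i 0) (i + g.length) (i + 2) with
  | some m => ((m : Int) - i - 1, k - (pvS g (i + 1) + k - g.getD i 0 - pvS g (m - 1)))
  | none => ((g.length : Int), k - (pvS g (i + 1) + k - g.getD i 0 - pvS g (i + g.length)))

-- A's per-start value is pvOut
theorem A_elem (k : Int) (g : List Int) (i : Nat) (hi : i < g.length) :
    queueFrontInner k (g.length : Int) (i : Int) g 1 (k - g.getD i 0)
      ((g.length : Int) - 1).toNat = pvOut k g i := by
  have hN : 0 < g.length := by omega
  have hrem : ((g.length : Int) - 1).toNat = g.length - 1 := by omega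
  have havail : k - g.getD i 0 = (pvS g (i + 1) + k - g.getD i 0) - pvS g (i + 1) := by ring
  have hcast1 : (1 : Int) = ((1 : Nat) : Int) := by norm_num
  rw [hrem, havail, hcast1]
  have := queueFrontInner_eq k g i hi (pvS g (i + 1) + k - g.getD i 0)
    (g.length - 1) 1 le_rfl (by omega) (by omega)
  rw [this]
  rfl

-- B's per-start value is pvOut
theorem B_elem (k : Int) (g : List Int) (i : Nat) (hi : i < g.length) :
    (Int.ofNat (match linSearch (pvP g) ((pvP g).getD (i + 1) 0 + k - g.getD i 0)
        (i + g.length) (i + 2) with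
      | none => g.length
      | some f => f - (i + 1)),
     g.getD i 0 + (pvP g).getD (i + (match linSearch (pvP g)
        ((pvP g).getD (i + 1) 0 + k - g.getD i 0) (i + g.length) (i + 2) with
      | none => g.length
      | some f => f - (i + 1))) 0 - (pvP g).getD (i + 1) 0) = pvOut k g i := by
  have hN : 0 < g.length := by omega
  have hX : (pvP g).getD (i + 1) 0 = pvS g (i + 1) := pvP_getD _ _ (by omega)
  rw [hX]
  unfold pvOut
  cases hls : linSearch (pvP g) (pvS g (i + 1) + k - g.getD i 0) (i + g.length) (i + 2) with
  | none =>
    simp only []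
    have hiN : (pvP g).getD (i + g.length) 0 = pvS g (i + g.length) := pvP_getD _ _ (by omega)
    rw [Prod.mk.injEq]
    refine ⟨rfl, ?_⟩
    rw [hiN]; ring
  | some m =>
    have hm := linSearch_some (pvP g) _ _ _ _ hls
    simp only []
    have ht : i + (m - (i + 1)) = m - 1 := by omega
    have hm1 : (pvP g).getD (m - 1) 0 = pvS g (m - 1) := pvP_getD _ _ (by omega)
    rw [Prod.mk.injEq]
    refine ⟨by simp only [Int.ofNat_eq_natCast]; omega, ?_⟩
    rw [ht, hm1]; ring

-- ===== VERDICT (by name: the statement is the Claim_ definition above) =====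
theorem queue_front_spec : Claim_equal_queue_front := by
  intro k g _dom
  unfold Spec_queue_front
  show queue_front k g = queue_front_alt k g
  rcases eq_or_ne g.length 0 with h0 | h0
  · have hnil : g = [] := List.eq_nil_of_length_eq_zero h0
    subst hnil
    rfl
  · have hN : 0 < g.length := Nat.pos_of_ne_zero h0
    unfold queue_front queue_front_alt
    rw [if_neg h0]
    dsimp only
    rw [build_P_eq]
    rw [foldl_two_append, foldl_two_append]
    simp only [List.nil_append]
    have hlen : ∀ i, i < g.length → ∀ X j, blockSearch (pvP g)
        ((List.range (((pvP g).length + 1 <<< (Nat.size (2 * g.length) / 2) - 1) / 1 <<< (Nat.size (2 * g.length) / 2))).map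
          (fun b => listMax (((pvP g).drop (b * 1 <<< (Nat.size (2 * g.length) / 2))).take (1 <<< (Nat.size (2 * g.length) / 2)))))
        (Nat.size (2 * g.length) / 2) X (i + g.length) j = linSearch (pvP g) X (i + g.length) j := by
      intro i hi X j
      exact blockSearch_eq _ _ _ _ _ (bmax_dominates (pvP g) _)
        (by rw [pvP_length]; omega) j
    congr 1
    · apply List.ext_getElem
      · simp [PySem.List.length_enumerate]
      · intro i h1 h2
        have hi : i < g.length := by simpa [PySem.List.length_enumerate] using h1
        simp only [List.getElem_map, PySem.List.getElem_enumerate, List.getElem_range, zero_add]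
        rw [hlen i hi]
        rw [← List.getD_eq_getElem _ 0 hi]
        exact congrArg Prod.fst (A_elem k g i hi) |>.trans
          (congrArg Prod.fst (B_elem k g i hi)).symm
    congr 1
    apply List.ext_getElem
    · simp [PySem.List.length_enumerate]
    · intro i h1 h2
      have hi : i < g.length := by simpa [PySem.List.length_enumerate] using h1
      simp only [List.getElem_map, PySem.List.getElem_enumerate, List.getElem_range, zero_add]
      rw [hlen i hi]
      rw [← List.getD_eq_getElem _ 0 hi]
      exact congrArg Prod.snd (A_elem k g i hi) |>.trans
        (congrArg Prod.snd (B_elem k g i hi)).symm
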